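-- pv_equiv track=rewrite | github.com/Sma-Das/Leetcode | 2-Medium/rotateBox.py | rotateBox
-- ===== SOURCE A (Python) =====
-- def rotateBox(box: list[list[str]], free: str = "#", fixed: str = "*"):
--     m, n = len(box), len(box[0])
--     box = [[box[j][i] for j in reversed(range(m))] for i in range(n)]
--     for r in reversed(range(n)):
--         for c in reversed(range(m)):
--             if box[r][c] == "#":
--                 p = r+1
--                 while p < n and (v := box[p][c]) != fixed:  # and v != free:
--                     box[p-1][c], box[p][c] = v, box[p-1][c]
--                     p += 1
--     return box
-- ===== SOURCE B (Python) =====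
-- def rotateBox(box: list[list[str]], free: str = "#", fixed: str = "*"):
--     m, n = len(box), len(box[0])
--     cols = []
--     for row in reversed(box):
--         out, others, stones = [], [], 0
--         for v in row[:n]:
--             if v == "#":
--                 stones += 1
--             elif v == fixed:
--                 out += others + ["#"] * stones + [v]
--                 others, stones = [], 0
--             else:
--                 others.append(v)
--         cols.append(out + others + ["#"] * stones)
--     return [[cols[c][r] for c in range(m)] for r in range(n)]
-- ===== Notes on version B (the rewrite author's own statement) =====
-- stated objective: alternative
-- what changed: A rotates the grid and then, per cell, bubbles each stone downward with repeated adjacent swaps; B makes one pass over each original row, splitting it at obstacles and emitting non-stone values followed by the counted stones per segment, then assembles the rotated output by index, with no swapping at all.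
import Mathlib
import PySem

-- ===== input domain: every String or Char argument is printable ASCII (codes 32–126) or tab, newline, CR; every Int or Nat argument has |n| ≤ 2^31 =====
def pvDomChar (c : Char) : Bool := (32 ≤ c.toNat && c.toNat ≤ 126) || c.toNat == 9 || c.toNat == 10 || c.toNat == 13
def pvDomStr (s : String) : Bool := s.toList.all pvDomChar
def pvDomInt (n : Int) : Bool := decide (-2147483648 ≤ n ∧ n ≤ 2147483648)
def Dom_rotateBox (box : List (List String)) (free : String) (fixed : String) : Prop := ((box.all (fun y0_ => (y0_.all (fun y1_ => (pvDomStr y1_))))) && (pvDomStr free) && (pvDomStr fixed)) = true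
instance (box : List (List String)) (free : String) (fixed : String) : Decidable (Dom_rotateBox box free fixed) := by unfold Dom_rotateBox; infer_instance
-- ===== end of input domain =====

-- B replaces A's swap-based stone bubbling by a one-pass per-segment gravity fill per column (alternative algorithm, no swapping).


-- ===== PORT A =====
-- 2D access on a list of rows: box[r][c] (in-range under the shape invariant; "" / [] defaults otherwise)
def pvGet2 (G : List (List String)) (r c : Nat) : String := (G.getD r []).getD c ""

def pvSet2 (G : List (List String)) (r c : Nat) (v : String) : List (List String) :=
  G.set r ((G.getD r []).set c v)

-- the inner `while p < n and (v := box[p][c]) != fixed:` swap loop of A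
def pvBubbleA (n c : Nat) (fixed : String) (G : List (List String)) (p : Nat) : List (List String) :=
  if h : p < n then
    if pvGet2 G p c ≠ fixed then
      pvBubbleA n c fixed (pvSet2 (pvSet2 G (p-1) c (pvGet2 G p c)) p c (pvGet2 G (p-1) c)) (p+1)
    else G
  else G
termination_by n - p
decreasing_by omega

def rotateBox (box : List (List String)) (free : String) (fixed : String) : List (List String) :=
  let m := box.length
  let n := (box.getD 0 []).length
  let rot := (List.range n).map (fun i => ((List.range m).reverse).map (fun j => (box.getD j []).getD i ""))
  ((List.range n).reverse).foldl (fun G r =>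
    ((List.range m).reverse).foldl (fun G c =>
      if pvGet2 G r c = "#" then pvBubbleA n c fixed G (r+1) else G) G) rot

-- ===== PORT B =====
-- one pass over a row: (finished segments, pending non-stones, pending stone count)
def pvGravRow (fixed : String) (row : List String) : List String :=
  let s := row.foldl (fun (s : List String × List String × Nat) v =>
      if v = "#" then (s.1, s.2.1, s.2.2 + 1)
      else if v = fixed then (s.1 ++ s.2.1 ++ List.replicate s.2.2 "#" ++ [v], [], 0)
      else (s.1, s.2.1 ++ [v], s.2.2)) ([], [], 0)
  s.1 ++ s.2.1 ++ List.replicate s.2.2 "#"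

def rotateBox_alt (box : List (List String)) (free : String) (fixed : String) : List (List String) :=
  let m := box.length
  let n := (box.getD 0 []).length
  let cols := box.reverse.map (fun row => pvGravRow fixed (row.take n))
  (List.range n).map (fun r => (List.range m).map (fun c => (cols.getD c []).getD r ""))

-- ===== PRECONDITION & SPEC =====
-- Pre_ excludes exactly the inputs where A raises IndexError: the empty box (box[0]) and boxes
-- where some row is shorter than row 0 (box[j][i] for i < len(box[0])).
def Pre_rotateBox (box : List (List String)) (free : String) (fixed : String) : Prop :=
  box ≠ [] ∧ ∀ row ∈ box, (box.getD 0 []).length ≤ row.length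
instance (box : List (List String)) (free : String) (fixed : String) : Decidable (Pre_rotateBox box free fixed) := by unfold Pre_rotateBox; infer_instance

def pvWitness_rotateBox : List (List String) × String × String :=
  ([["#", ".", "*"], [".", "#", "."]], "#", "*")

def Spec_rotateBox (box : List (List String)) (free : String) (fixed : String) (out : List (List String)) : Prop := out = rotateBox_alt box free fixed
instance (box : List (List String)) (free : String) (fixed : String) (out : List (List String)) : Decidable (Spec_rotateBox box free fixed out) := by unfold Spec_rotateBox; infer_instance

-- ===== CLAIM (what is proved, stated in full; the proofs are below) =====
def Claim_equal_rotateBox : Prop := ∀ (box : List (List String)) (free : String) (fixed : String), Dom_rotateBox box free fixed → Pre_rotateBox box free fixed → Spec_rotateBox box free fixed (rotateBox box free fixed)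

-- ===== LEMMAS AND PROOFS =====

def pvGravAux (fixed : String) (out others : List String) (k : Nat) (l : List String) : List String :=
  match l with
  | [] => out ++ others ++ List.replicate k "#"
  | v :: t =>
    if v = "#" then pvGravAux fixed out others (k+1) t
    else if v = fixed then pvGravAux fixed (out ++ others ++ List.replicate k "#" ++ [v]) [] 0 t
    else pvGravAux fixed out (others ++ [v]) k t

def pvP (fixed : String) (v : String) : Bool := v == "#" || v != fixed

theorem pvGravAux_eq (fixed : String) (l : List String) : ∀ (out others : List String) (k : Nat),
    pvGravAux fixed out others k l =
      out ++ others ++ (l.takeWhile (pvP fixed)).filter (fun v => v != "#")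
        ++ List.replicate (k + (l.takeWhile (pvP fixed)).count "#") "#"
        ++ (match l.dropWhile (pvP fixed) with
            | [] => []
            | b :: r => b :: pvGravAux fixed [] [] 0 r) := by
  induction l with
  | nil => intro out others k; simp [pvGravAux]
  | cons v t ih =>
    intro out others k
    by_cases h1 : v = "#"
    · subst h1
      simp [pvGravAux, pvP, ih]; omega
    · by_cases h2 : v = fixed
      · subst h2
        have hP : pvP v v = false := by simp [pvP, h1]
        simp [pvGravAux, h1, hP, ih]
      · have hP : pvP fixed v = true := by simp [pvP, h2]
        simp [pvGravAux, h1, h2, hP, ih]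

theorem pvGravAux_out (fixed : String) (l : List String) : ∀ (out others : List String) (k : Nat),
    pvGravAux fixed out others k l = out ++ pvGravAux fixed [] others k l := by
  induction l with
  | nil => intro out others k; simp [pvGravAux]
  | cons v t ih =>
    intro out others k
    by_cases h1 : v = "#"
    · subst h1
      simp only [pvGravAux, if_pos rfl]
      exact ih out others (k+1)
    · by_cases h2 : v = fixed
      · subst h2
        simp only [pvGravAux, if_neg h1, if_pos rfl, List.nil_append]
        rw [ih (out ++ others ++ List.replicate k "#" ++ [v]) [] 0,
            ih (others ++ List.replicate k "#" ++ [v]) [] 0]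
        simp
      · simp only [pvGravAux, if_neg h1, if_neg h2, List.nil_append]
        exact ih out (others ++ [v]) k

theorem pvGravAux_others_cons (fixed : String) (l : List String) : ∀ (x : String) (others : List String) (k : Nat),
    pvGravAux fixed [] (x :: others) k l = x :: pvGravAux fixed [] others k l := by
  induction l with
  | nil => intro x others k; simp [pvGravAux]
  | cons v t ih =>
    intro x others k
    by_cases h1 : v = "#"
    · subst h1
      simp only [pvGravAux, if_pos rfl]
      exact ih x others (k+1)
    · by_cases h2 : v = fixed
      · subst h2
        simp only [pvGravAux, if_neg h1, if_pos rfl, List.nil_append]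
        rw [pvGravAux_out v t (x :: others ++ List.replicate k "#" ++ [v]) [] 0,
            pvGravAux_out v t (others ++ List.replicate k "#" ++ [v]) [] 0]
        simp
      · simp only [pvGravAux, if_neg h1, if_neg h2, List.nil_append, List.cons_append]
        exact ih x (others ++ [v]) k

theorem pvG_cons_ne (fixed : String) (v : String) (t : List String) (h : v ≠ "#") :
    pvGravAux fixed [] [] 0 (v :: t) = v :: pvGravAux fixed [] [] 0 t := by
  by_cases h2 : v = fixed
  · subst h2
    simp [pvGravAux, h]
    rw [pvGravAux_out]
    simp
  · simp only [pvGravAux, h, h2, if_false, List.nil_append]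
    exact pvGravAux_others_cons fixed t v [] 0

theorem pvGravAux_length (fixed : String) (l : List String) : ∀ (out others : List String) (k : Nat),
    (pvGravAux fixed out others k l).length = out.length + others.length + k + l.length := by
  induction l with
  | nil => intro out others k; simp [pvGravAux]; omega
  | cons v t ih =>
    intro out others k
    by_cases h1 : v = "#"
    · simp [pvGravAux, h1, ih]; omega
    · by_cases h2 : v = fixed
      · subst h2; simp [pvGravAux, h1, ih]; omega
      · simp [pvGravAux, h1, h2, ih]; omega

theorem pvG_stone_decomp (fixed : String) (t : List String) :
    ∃ S rest, pvGravAux fixed [] [] 0 t = S ++ rest ∧ (∀ v ∈ S, v ≠ fixed) ∧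
      (rest = [] ∨ ∃ r', rest = fixed :: r') ∧
      pvGravAux fixed [] [] 0 ("#" :: t) = S ++ "#" :: rest := by
  have hst : pvGravAux fixed [] [] 0 ("#" :: t) = pvGravAux fixed [] [] 1 t := by
    simp [pvGravAux]
  by_cases hf : fixed = "#"
  · subst hf
    have hP : pvP "#" = fun _ => true := by funext v; simp [pvP, bne]
    have htk : t.takeWhile (pvP "#") = t := by
      rw [hP]; exact List.takeWhile_eq_self_iff.mpr fun x _ => rfl
    have hdw : t.dropWhile (pvP "#") = [] := by
      rw [hP]; exact List.dropWhile_eq_nil_iff.mpr fun x _ => rfl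
    refine ⟨(t.filter (fun v => v != "#")), List.replicate (t.count "#") "#", ?_, ?_, ?_, ?_⟩
    · rw [pvGravAux_eq]; simp [htk, hdw]
    · intro v hv; simp at hv; exact hv.2
    · rcases Nat.eq_zero_or_pos (t.count "#") with h | h
      · left; simp [h]
      · right; exact ⟨List.replicate (t.count "#" - 1) "#", by
          rw [← List.replicate_succ]; congr 1; omega⟩
    · rw [hst, pvGravAux_eq]; simp [htk, hdw, List.replicate_succ, Nat.add_comm 1]
  · have hSne : ∀ v ∈ (t.takeWhile (pvP fixed)).filter (fun v => v != "#")
        ++ List.replicate ((t.takeWhile (pvP fixed)).count "#") "#", v ≠ fixed := by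
      intro v hv
      rcases List.mem_append.1 hv with h | h
      · rcases List.mem_filter.1 h with ⟨hmem, hne⟩
        have hP := List.mem_takeWhile_imp hmem
        simp [pvP] at hP
        rcases hP with h1 | h1
        · simp at hne; exact absurd h1 hne
        · exact h1
      · have : v = "#" := List.eq_of_mem_replicate h
        intro hc; exact hf (hc ▸ this)
    rcases hd : t.dropWhile (pvP fixed) with _ | ⟨b, r⟩
    · refine ⟨(t.takeWhile (pvP fixed)).filter (fun v => v != "#")
          ++ List.replicate ((t.takeWhile (pvP fixed)).count "#") "#", [], ?_, hSne, ?_, ?_⟩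
      · rw [pvGravAux_eq]; simp [hd]
      · left; rfl
      · rw [hst, pvGravAux_eq]
        simp [hd, List.replicate_succ', Nat.add_comm 1]
    · have hb2 : pvP fixed b = false := by
        have h2 : t.dropWhile (pvP fixed) ≠ [] := by simp [hd]
        have := List.head_dropWhile_not (pvP fixed) h2
        simpa [hd] using this
      have hbfix : b = fixed := by
        simp [pvP] at hb2; exact hb2.2
      refine ⟨(t.takeWhile (pvP fixed)).filter (fun v => v != "#")
          ++ List.replicate ((t.takeWhile (pvP fixed)).count "#") "#",
          b :: pvGravAux fixed [] [] 0 r, ?_, hSne, ?_, ?_⟩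
      · rw [pvGravAux_eq]; simp [hd]
      · right; exact ⟨pvGravAux fixed [] [] 0 r, by rw [hbfix]⟩
      · rw [hst, pvGravAux_eq]
        simp [hd, List.replicate_succ', Nat.add_comm 1]

def pvBubbleC (n : Nat) (fixed : String) (col : List String) (p : Nat) : List String :=
  if _h : p < n then
    if col.getD p "" ≠ fixed then
      pvBubbleC n fixed ((col.set (p-1) (col.getD p "")).set p (col.getD (p-1) "")) (p+1)
    else col
  else col
termination_by n - p
decreasing_by omega

theorem pvGetD_append_len (pre : List String) (x : String) (t : List String) :
    (pre ++ x :: t).getD pre.length "" = x := by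
  simp [List.getD_eq_getElem?_getD, List.getElem?_append_right]

theorem pvSet_append_len (pre : List String) (x y : String) (t : List String) :
    (pre ++ x :: t).set pre.length y = pre ++ y :: t := by
  rw [List.set_append]
  simp

theorem pvBubbleC_spec (fixed : String) (seg : List String) :
    ∀ (pre rest : List String), (∀ v ∈ seg, v ≠ fixed) →
      (rest = [] ∨ ∃ r', rest = fixed :: r') →
      pvBubbleC (pre.length + 1 + seg.length + rest.length) fixed
        (pre ++ "#" :: (seg ++ rest)) (pre.length + 1) = pre ++ (seg ++ "#" :: rest) := by
  induction seg with
  | nil =>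
    intro pre rest _ hrest
    rcases hrest with h | ⟨r', h⟩
    · subst h
      rw [pvBubbleC]
      simp
    · subst h
      rw [pvBubbleC]
      have hget : (pre ++ "#" :: ([] ++ fixed :: r')).getD (pre.length + 1) "" = fixed := by
        have : pre ++ "#" :: ([] ++ fixed :: r') = (pre ++ ["#"]) ++ fixed :: r' := by simp
        rw [this, show pre.length + 1 = (pre ++ ["#"]).length by simp]
        exact pvGetD_append_len _ _ _
      simp [hget]
  | cons w seg' ih =>
    intro pre rest hseg hrest
    have hw : w ≠ fixed := hseg w (List.mem_cons_self)
    have hlt : pre.length + 1 < pre.length + 1 + (w :: seg').length + rest.length := by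
      simp; omega
    have hcol : pre ++ "#" :: ((w :: seg') ++ rest) = (pre ++ ["#"]) ++ w :: (seg' ++ rest) := by simp
    have hget : (pre ++ "#" :: ((w :: seg') ++ rest)).getD (pre.length + 1) "" = w := by
      rw [hcol, show pre.length + 1 = (pre ++ ["#"]).length by simp]
      exact pvGetD_append_len _ _ _
    have hgetm : (pre ++ "#" :: ((w :: seg') ++ rest)).getD (pre.length + 1 - 1) "" = "#" := by
      simp only [Nat.add_sub_cancel]
      exact pvGetD_append_len _ _ _
    rw [pvBubbleC, dif_pos hlt, if_pos (by rw [hget]; exact hw)]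
    have hswap : ((pre ++ "#" :: ((w :: seg') ++ rest)).set (pre.length + 1 - 1)
          ((pre ++ "#" :: ((w :: seg') ++ rest)).getD (pre.length + 1) "")).set (pre.length + 1)
          ((pre ++ "#" :: ((w :: seg') ++ rest)).getD (pre.length + 1 - 1) "")
        = (pre ++ [w]) ++ "#" :: (seg' ++ rest) := by
      rw [hget, hgetm]
      simp only [Nat.add_sub_cancel]
      rw [pvSet_append_len pre "#" w ((w :: seg') ++ rest)]
      have h2 : pre ++ w :: ((w :: seg') ++ rest) = (pre ++ [w]) ++ w :: (seg' ++ rest) := by simp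
      rw [h2, show pre.length + 1 = (pre ++ [w]).length by simp, pvSet_append_len]
    rw [hswap]
    have ihx := ih (pre ++ [w]) rest (fun v hv => hseg v (List.mem_cons_of_mem _ hv)) hrest
    have hlen : (pre ++ [w]).length + 1 + seg'.length + rest.length
        = pre.length + 1 + (w :: seg').length + rest.length := by simp; omega
    have hp1 : (pre ++ [w]).length + 1 = pre.length + 1 + 1 := by simp
    rw [hlen, hp1] at ihx
    rw [ihx]
    simp

def pvStepC (n : Nat) (fixed : String) (col : List String) (r : Nat) : List String :=
  if col.getD r "" = "#" then pvBubbleC n fixed col (r+1) else col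

theorem pvFoldl_stepC (n : Nat) (fixed : String) (col : List String) (hlen : col.length = n) :
    ∀ k, k ≤ n → ((List.range' (n-k) k).reverse).foldl (pvStepC n fixed) col
      = col.take (n-k) ++ pvGravAux fixed [] [] 0 (col.drop (n-k)) := by
  intro k
  induction k with
  | zero => intro _; rw [← hlen]; simp [pvGravAux]
  | succ k ihk =>
    intro hk
    have ih := ihk (by omega)
    have ha : n - (k+1) < col.length := by omega
    set a := n - (k+1) with hadef
    have ha1 : a + 1 = n - k := by omega
    have hrange : (List.range' a (k+1)).reverse = (List.range' (n-k) k).reverse ++ [a] := by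
      rw [List.range'_succ, ha1]
      simp
    rw [hrange, List.foldl_append]
    simp only [List.foldl_cons, List.foldl_nil]
    rw [ih]
    set S := col.take (n-k) ++ pvGravAux fixed [] [] 0 (col.drop (n-k)) with hSdef
    have hdrop : col.drop a = col[a] :: col.drop (n-k) := by
      rw [← ha1]; exact List.drop_eq_getElem_cons ha
    have htake : col.take (n-k) = col.take a ++ [col[a]] := by
      rw [← ha1, List.take_add_one, List.getElem?_eq_getElem ha]
      simp
    have htl : (col.take a).length = a := by simp; omega
    have hgetSa : S.getD a "" = col[a] := by
      rw [hSdef, List.getD_append _ _ _ _ (by simp; omega), htake]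
      have hg := pvGetD_append_len (col.take a) col[a] []
      rw [htl] at hg
      simpa using hg
    by_cases hsharp : col[a] = "#"
    · have hdecomp := pvG_stone_decomp fixed (col.drop (n-k))
      rcases hdecomp with ⟨S', rest, hgt, hS', hrest, hgsharp⟩
      have hSeq : S = col.take a ++ "#" :: (S' ++ rest) := by
        rw [hSdef, htake, hgt, hsharp]; simp
      have hglen : (pvGravAux fixed [] [] 0 (col.drop (n-k))).length = (col.drop (n-k)).length := by
        rw [pvGravAux_length]; simp
      have hsr : S'.length + rest.length = k := by
        have := hglen
        rw [hgt] at this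
        simp at this
        omega
      have hn : (col.take a).length + 1 + S'.length + rest.length = n := by omega
      have hp : (col.take a).length + 1 = a + 1 := by omega
      have hb := pvBubbleC_spec fixed S' (col.take a) rest hS' hrest
      rw [hn, hp] at hb
      rw [pvStepC, if_pos (by rw [hgetSa]; exact hsharp), hSeq, hb]
      rw [← hgsharp]
      have hx : ("#" : String) :: col.drop (n-k) = col.drop a := by rw [hdrop, hsharp]
      rw [hx]
    · rw [pvStepC, if_neg (by rw [hgetSa]; exact hsharp)]
      rw [hSdef, htake, hdrop, pvG_cons_ne fixed _ _ hsharp]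
      simp only [List.append_assoc, List.cons_append, List.nil_append]

theorem pvCol_gravity (n : Nat) (fixed : String) (col : List String) (hlen : col.length = n) :
    ((List.range n).reverse).foldl (pvStepC n fixed) col = pvGravAux fixed [] [] 0 col := by
  have h := pvFoldl_stepC n fixed col hlen n (le_refl n)
  simpa [List.range_eq_range'] using h

def pvColProj (G : List (List String)) (c : Nat) : List String := G.map (fun row => row.getD c "")
def pvShape (n m : Nat) (G : List (List String)) : Prop :=
  G.length = n ∧ ∀ (i : Nat) (h : i < G.length), G[i].length = m

theorem pvColProj_length (G : List (List String)) (c : Nat) : (pvColProj G c).length = G.length := by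
  simp [pvColProj]

theorem pvGet2_eq_colProj (G : List (List String)) (r c : Nat) :
    pvGet2 G r c = (pvColProj G c).getD r "" := by
  by_cases h : r < G.length
  · simp [pvGet2, pvColProj, List.getD_eq_getElem?_getD, List.getElem?_map, List.getElem?_eq_getElem h]
  · simp [pvGet2, pvColProj, List.getD_eq_getElem?_getD, Nat.le_of_not_lt h]

theorem pvShape_set2 (n m : Nat) (G : List (List String)) (r c : Nat) (v : String)
    (h : pvShape n m G) : pvShape n m (pvSet2 G r c v) := by
  obtain ⟨h1, h2⟩ := h
  refine ⟨by simp [pvSet2, h1], ?_⟩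
  intro i hi
  have hi' : i < G.length := by simpa [pvSet2] using hi
  show (pvSet2 G r c v)[i].length = m
  have hgi : (pvSet2 G r c v)[i] = if r = i then (G.getD r []).set c v else G[i]'hi' := by
    simp [pvSet2, List.getElem_set]
  rw [hgi]
  split
  · next heq =>
    subst heq
    rw [List.length_set, List.getD_eq_getElem G [] hi']
    exact h2 r hi'
  · exact h2 i hi'

theorem pvColProj_set2_self (n m : Nat) (G : List (List String)) (r c : Nat) (v : String)
    (hG : pvShape n m G) (hc : c < m) :
    pvColProj (pvSet2 G r c v) c = (pvColProj G c).set r v := by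
  obtain ⟨h1, h2⟩ := hG
  by_cases hr : r < G.length
  · have hlen : c < (G.getD r []).length := by
      rw [List.getD_eq_getElem G [] hr, h2 r hr]; exact hc
    simp only [pvColProj, pvSet2, List.map_set]
    congr 1
    show ((G.getD r []).set c v).getD c "" = v
    rw [List.getD_eq_getElem _ _ (by simpa using hlen)]
    simp [List.getElem_set]
  · have hGeq : pvSet2 G r c v = G := by
      simp [pvSet2]
      exact List.set_eq_of_length_le (by omega)
    rw [hGeq, List.set_eq_of_length_le (by simp [pvColProj]; omega)]

theorem pvColProj_set2_ne (G : List (List String)) (r c c' : Nat) (v : String) (hne : c' ≠ c) :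
    pvColProj (pvSet2 G r c v) c' = pvColProj G c' := by
  by_cases hr : r < G.length
  · simp only [pvColProj, pvSet2, List.map_set]
    have hx : ((G.getD r []).set c v).getD c' "" = (G.getD r []).getD c' "" := by
      show ((G.getD r []).set c v)[c']?.getD "" = _
      rw [List.getElem?_set_ne (Ne.symm hne)]
      rfl
    rw [hx]
    have hy : (G.getD r []).getD c' "" = (G.map (fun row => row.getD c' ""))[r]'(by simpa using hr) := by
      simp [List.getD_eq_getElem?_getD, List.getElem?_eq_getElem hr]
    rw [hy]
    exact List.set_getElem_self (by simpa using hr)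
  · have hGeq : pvSet2 G r c v = G := by
      simp [pvSet2]
      exact List.set_eq_of_length_le (by omega)
    rw [hGeq]


theorem pvShape_bubbleA (n m c : Nat) (fixed : String) :
    ∀ (p : Nat) (G : List (List String)), pvShape n m G → pvShape n m (pvBubbleA n c fixed G p) := by
  intro p G hG
  induction hfuel : n - p generalizing p G with
  | zero =>
    rw [pvBubbleA]
    have : ¬ p < n := by omega
    simp [this]
    exact hG
  | succ k ih =>
    rw [pvBubbleA]
    have hpn : p < n := by omega
    rw [dif_pos hpn]
    split
    · exact ih _ _ (pvShape_set2 n m _ _ _ _ (pvShape_set2 n m _ _ _ _ hG)) (by omega)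
    · exact hG

theorem pvColProj_bubbleA_self (n m c : Nat) (fixed : String) (hc : c < m) :
    ∀ (p : Nat) (G : List (List String)), pvShape n m G →
      pvColProj (pvBubbleA n c fixed G p) c = pvBubbleC n fixed (pvColProj G c) p := by
  intro p G hG
  induction hfuel : n - p generalizing p G with
  | zero =>
    rw [pvBubbleA, pvBubbleC]
    have : ¬ p < n := by omega
    simp [this]
  | succ k ih =>
    rw [pvBubbleA, pvBubbleC]
    have hpn : p < n := by omega
    rw [dif_pos hpn, dif_pos hpn]
    rw [← pvGet2_eq_colProj, ← pvGet2_eq_colProj]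
    split
    · have hS1 := pvShape_set2 n m G (p-1) c (pvGet2 G p c) hG
      rw [ih _ _ (pvShape_set2 n m _ p c _ hS1) (by omega)]
      congr 1
      rw [pvColProj_set2_self n m _ p c _ hS1 hc,
          pvColProj_set2_self n m G (p-1) c _ hG hc,
          pvGet2_eq_colProj, pvGet2_eq_colProj]
    · rfl

theorem pvColProj_bubbleA_ne (n c c' : Nat) (fixed : String) (hne : c' ≠ c) :
    ∀ (p : Nat) (G : List (List String)),
      pvColProj (pvBubbleA n c fixed G p) c' = pvColProj G c' := by
  intro p G
  induction hfuel : n - p generalizing p G with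
  | zero =>
    rw [pvBubbleA]
    have : ¬ p < n := by omega
    simp [this]
  | succ k ih =>
    rw [pvBubbleA]
    have hpn : p < n := by omega
    rw [dif_pos hpn]
    split
    · rw [ih _ _ (by omega), pvColProj_set2_ne, pvColProj_set2_ne] <;> exact hne
    · rfl

def pvInner (n : Nat) (fixed : String) (r : Nat) (G : List (List String)) (cs : List Nat) : List (List String) :=
  cs.foldl (fun G c => if pvGet2 G r c = "#" then pvBubbleA n c fixed G (r+1) else G) G

theorem pvShape_inner (n m : Nat) (fixed : String) (r : Nat) :
    ∀ (cs : List Nat) (G : List (List String)), pvShape n m G → pvShape n m (pvInner n fixed r G cs) := by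
  intro cs
  induction cs with
  | nil => intro G hG; exact hG
  | cons c0 cs' ih =>
    intro G hG
    show pvShape n m (pvInner n fixed r (if pvGet2 G r c0 = "#" then pvBubbleA n c0 fixed G (r+1) else G) cs')
    apply ih
    split
    · exact pvShape_bubbleA n m c0 fixed (r+1) G hG
    · exact hG

theorem pvInner_ne (n : Nat) (fixed : String) (r : Nat) :
    ∀ (cs : List Nat) (G : List (List String)) (c : Nat), c ∉ cs →
      pvColProj (pvInner n fixed r G cs) c = pvColProj G c := by
  intro cs
  induction cs with
  | nil => intro G c _; rfl
  | cons c0 cs' ih =>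
    intro G c hc
    have hne : c ≠ c0 := fun h => hc (h ▸ List.mem_cons_self)
    have hnin : c ∉ cs' := fun h => hc (List.mem_cons_of_mem _ h)
    show pvColProj (pvInner n fixed r (if pvGet2 G r c0 = "#" then pvBubbleA n c0 fixed G (r+1) else G) cs') c = _
    rw [ih _ c hnin]
    split
    · exact pvColProj_bubbleA_ne n c0 c fixed hne (r+1) G
    · rfl

theorem pvInner_self (n m : Nat) (fixed : String) (r : Nat) :
    ∀ (cs : List Nat), cs.Nodup → (∀ x ∈ cs, x < m) →
      ∀ (G : List (List String)) (c : Nat), pvShape n m G → c < m →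
        pvColProj (pvInner n fixed r G cs) c
          = if c ∈ cs then pvStepC n fixed (pvColProj G c) r else pvColProj G c := by
  intro cs
  induction cs with
  | nil => intro _ _ G c _ _; simp [pvInner]
  | cons c0 cs' ih =>
    intro hnd hmem G c hG hc
    have hnd' : cs'.Nodup := (List.nodup_cons.1 hnd).2
    have hc0nin : c0 ∉ cs' := (List.nodup_cons.1 hnd).1
    show pvColProj (pvInner n fixed r (if pvGet2 G r c0 = "#" then pvBubbleA n c0 fixed G (r+1) else G) cs') c = _
    by_cases heq : c = c0
    · subst heq
      rw [pvInner_ne n fixed r cs' _ c hc0nin]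
      rw [if_pos List.mem_cons_self, pvStepC]
      by_cases h : pvGet2 G r c = "#"
      · rw [if_pos h, if_pos (by rw [← pvGet2_eq_colProj]; exact h)]
        exact pvColProj_bubbleA_self n m c fixed hc (r+1) G hG
      · rw [if_neg h, if_neg (by rw [← pvGet2_eq_colProj]; exact h)]
    · have hmemiff : (c ∈ c0 :: cs') = (c ∈ cs') := by simp [List.mem_cons, heq]
      simp only [List.mem_cons, heq, false_or]
      have hG1 : pvShape n m (if pvGet2 G r c0 = "#" then pvBubbleA n c0 fixed G (r+1) else G) := by
        split
        · exact pvShape_bubbleA n m c0 fixed (r+1) G hG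
        · exact hG
      rw [ih hnd' (fun x hx => hmem x (List.mem_cons_of_mem _ hx)) _ c hG1 hc]
      have hproj : pvColProj (if pvGet2 G r c0 = "#" then pvBubbleA n c0 fixed G (r+1) else G) c = pvColProj G c := by
        split
        · exact pvColProj_bubbleA_ne n c0 c fixed heq (r+1) G
        · rfl
      rw [hproj]

theorem pvOuter (n m : Nat) (fixed : String) :
    ∀ (rs : List Nat) (G : List (List String)) (c : Nat), pvShape n m G → c < m →
      pvColProj (rs.foldl (fun G r => pvInner n fixed r G ((List.range m).reverse)) G) c
        = rs.foldl (pvStepC n fixed) (pvColProj G c) := by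
  intro rs
  induction rs with
  | nil => intro G c _ _; rfl
  | cons r rs' ih =>
    intro G c hG hc
    simp only [List.foldl_cons]
    rw [ih _ c (pvShape_inner n m fixed r _ G hG) hc]
    congr 1
    rw [pvInner_self n m fixed r _ (by simp [List.nodup_range]) (by simp) G c hG hc]
    simp [hc]

theorem pvShape_outer (n m : Nat) (fixed : String) :
    ∀ (rs : List Nat) (G : List (List String)), pvShape n m G →
      pvShape n m (rs.foldl (fun G r => pvInner n fixed r G ((List.range m).reverse)) G) := by
  intro rs
  induction rs with
  | nil => intro G hG; exact hG
  | cons r rs' ih =>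
    intro G hG
    exact ih _ (pvShape_inner n m fixed r _ G hG)

theorem pvGravRow_eq (fixed : String) (row : List String) :
    pvGravRow fixed row = pvGravAux fixed [] [] 0 row := by
  suffices h : ∀ (l : List String) (out others : List String) (k : Nat),
      (let s := l.foldl (fun (s : List String × List String × Nat) v =>
        if v = "#" then (s.1, s.2.1, s.2.2 + 1)
        else if v = fixed then (s.1 ++ s.2.1 ++ List.replicate s.2.2 "#" ++ [v], [], 0)
        else (s.1, s.2.1 ++ [v], s.2.2)) (out, others, k)
      ; s.1 ++ s.2.1 ++ List.replicate s.2.2 "#") = pvGravAux fixed out others k l by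
    exact h row [] [] 0
  intro l
  induction l with
  | nil => intro out others k; simp [pvGravAux]
  | cons v t ih =>
    intro out others k
    by_cases h1 : v = "#"
    · simp only [List.foldl_cons, pvGravAux, h1]
      exact ih out others (k+1)
    · by_cases h2 : v = fixed
      · subst h2
        simp only [List.foldl_cons, pvGravAux, if_neg h1, if_true]
        exact ih _ [] 0
      · simp only [List.foldl_cons, pvGravAux, if_neg h1, if_neg h2]
        exact ih out (others ++ [v]) k

theorem pvMap_range_getD (l : List String) (n : Nat) (h : n ≤ l.length) :
    (List.range n).map (fun i => l.getD i "") = l.take n := by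
  apply List.ext_getElem
  · simp; omega
  · intro i h1 h2
    have hin : i < n := by simpa using h1
    have hil : i < l.length := by simp at h2; omega
    simp [List.getElem?_eq_getElem hil]

theorem pvColProj_entry (G : List (List String)) (r c : Nat) (hr : r < G.length) :
    (pvColProj G c)[r]'(by simpa [pvColProj] using hr) = G[r].getD c "" := by
  simp [pvColProj]

-- ===== VERDICT (by name: the statement is the Claim_ definition above) =====
theorem rotateBox_spec : Claim_equal_rotateBox := by
  intro box free fixed _hdom hpre
  obtain ⟨hbne, hrows⟩ := hpre
  unfold Spec_rotateBox
  set m := box.length with hm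
  set n := (box.getD 0 []).length with hn
  have hmpos : 0 < m := by
    rw [hm]; exact List.length_pos_iff.mpr hbne
  set rot := (List.range n).map (fun i => ((List.range m).reverse).map (fun j => (box.getD j []).getD i "")) with hrotdef
  have hrot : rotateBox box free fixed
      = ((List.range n).reverse).foldl (fun G r => pvInner n fixed r G ((List.range m).reverse)) rot := rfl
  set F := ((List.range n).reverse).foldl (fun G r => pvInner n fixed r G ((List.range m).reverse)) rot with hFdef
  have halt : rotateBox_alt box free fixed
      = (List.range n).map (fun r => (List.range m).map (fun c =>
          (((box.reverse.map (fun row => pvGravRow fixed (row.take n))).getD c []).getD r ""))) := rfl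
  have hShapeRot : pvShape n m rot := by
    refine ⟨by simp [hrotdef], ?_⟩
    intro i hi
    simp [hrotdef]
  have hShapeF : pvShape n m F := pvShape_outer n m fixed _ rot hShapeRot
  have hrowlen : ∀ c, c < m → n ≤ (box.getD (m-1-c) []).length := by
    intro c hc
    have hlt : m - 1 - c < box.length := by omega
    have hmem : box.getD (m-1-c) [] ∈ box := by
      rw [List.getD_eq_getElem box [] hlt]
      exact List.getElem_mem hlt
    exact hrows _ hmem
  have hcol : ∀ c, c < m → pvColProj rot c = (box.getD (m-1-c) []).take n := by
    intro c hc
    have hentry : ∀ i : Nat, (((List.range m).reverse).map (fun j => (box.getD j []).getD i "")).getD c ""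
        = (box.getD (m-1-c) []).getD i "" := by
      intro i
      rw [List.getD_eq_getElem _ _ (by simp; exact hc)]
      simp [List.getElem_reverse, List.getElem_range]
    have hmap : pvColProj rot c = (List.range n).map (fun i => (box.getD (m-1-c) []).getD i "") := by
      simp only [pvColProj, hrotdef, List.map_map]
      apply List.map_congr_left
      intro i _
      exact hentry i
    rw [hmap, pvMap_range_getD _ _ (hrowlen c hc)]
  have hcolF : ∀ c, c < m → pvColProj F c = pvGravAux fixed [] [] 0 ((box.getD (m-1-c) []).take n) := by
    intro c hc
    rw [hFdef, pvOuter n m fixed _ rot c hShapeRot hc,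
        pvCol_gravity n fixed _ (by rw [pvColProj_length, hShapeRot.1]), hcol c hc]
  have hglen : ∀ c, c < m → (pvGravAux fixed [] [] 0 ((box.getD (m-1-c) []).take n)).length = n := by
    intro c hc
    rw [pvGravAux_length]
    simp
    exact hrowlen c hc
  rw [hrot, halt]
  apply List.ext_getElem
  · rw [hShapeF.1]; simp
  · intro r h1 h2
    have hrn : r < n := by rw [hShapeF.1] at h1; exact h1
    apply List.ext_getElem
    · rw [hShapeF.2 r h1]; simp
    · intro c hc1 hc2
      have hcm : c < m := by rw [hShapeF.2 r h1] at hc1; exact hc1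
      -- RHS entry
      have hcolslen : c < (box.reverse.map (fun row => pvGravRow fixed (row.take n))).length := by
        simp; exact hcm
      have hcols : (box.reverse.map (fun row => pvGravRow fixed (row.take n))).getD c []
          = pvGravAux fixed [] [] 0 ((box.getD (m-1-c) []).take n) := by
        rw [List.getD_eq_getElem _ _ hcolslen, List.getElem_map]
        rw [← pvGravRow_eq]
        congr 2
        rw [List.getElem_reverse]
        rw [List.getD_eq_getElem box [] (by omega)]
      -- LHS entry
      have hLHS : (F[r]'h1)[c]'hc1 = (pvColProj F c)[r]'(by rw [pvColProj_length, hShapeF.1]; exact hrn) := by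
        rw [pvColProj_entry F r c h1]
        rw [List.getD_eq_getElem _ _ hc1]
      rw [hLHS]
      simp only [List.getElem_map, List.getElem_range]
      rw [hcols]
      rw [List.getD_eq_getElem _ _ (by rw [hglen c hcm]; exact hrn)]
      simp only [hcolF c hcm]
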